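-- pv_equiv track=rewrite | github.com/SMosl/AdventOfCode2023 | Day_13/Day13.py | find_reflective_i
-- ===== SOURCE A (Python) =====
-- def find_reflective_i(pattern, orientation, original_sol):
-- 	# orientation and original_sol are needed to ensure part 2 doesn't return the same line of reflection for a pattern as part 1
-- 	c_counts = [pattern.index(x) for x in pattern]
-- 	potential_reflections = [i for i in range(len(pattern) - 1) if [pattern.index(x) for x in pattern][i] == [pattern.index(x) for x in pattern][i+1]]
-- 	for i in potential_reflections:
-- 		after = [x for x in c_counts[i+1:]]
-- 		before = [x for x in c_counts[:i+1]]
-- 		if len(after) > len(before):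
-- 			if before[::-1] == after[:len(before)]:
-- 				if ((i + 1) != original_sol[0]) or (orientation != original_sol[1]):
-- 					return i + 1
-- 		else:
-- 			before = before[::-1]
-- 			if after == before[:len(after)]:
-- 				if ((i + 1) != original_sol[0]) or (orientation != original_sol[1]):
-- 					return i + 1
-- 	return False
-- ===== SOURCE B (Python) =====
-- def find_reflective_i(pattern, orientation, original_sol):
-- 	# Two-pointer outward expansion per candidate split; no first-occurrence
-- 	# fingerprint list and no potential_reflections pre-filter.
-- 	n = len(pattern)
-- 	for i in range(1, n):
-- 		lo, hi = i - 1, i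
-- 		ok = True
-- 		while lo >= 0 and hi < n:
-- 			if pattern[lo] != pattern[hi]:
-- 				ok = False
-- 				break
-- 			lo -= 1
-- 			hi += 1
-- 		if ok and (i != original_sol[0] or orientation != original_sol[1]):
-- 			return i
-- 	return False
-- ===== Notes on version B (the rewrite author's own statement) =====
-- stated objective: faster
-- what changed: Replaced the repeatedly rebuilt first-occurrence fingerprint list, the potential_reflections pre-filter and the reversed-slice comparisons with a single loop over candidate splits that checks each split by a direct two-pointer outward comparison of the rows. Pre_ excludes exactly the inputs on which A finds no admissible mirror line and returns the bool False, which is not an int.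
-- outside the precondition, e.g. on find_reflective_i([], 0, (0, 0)): A returns False, B returns False
import Mathlib
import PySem

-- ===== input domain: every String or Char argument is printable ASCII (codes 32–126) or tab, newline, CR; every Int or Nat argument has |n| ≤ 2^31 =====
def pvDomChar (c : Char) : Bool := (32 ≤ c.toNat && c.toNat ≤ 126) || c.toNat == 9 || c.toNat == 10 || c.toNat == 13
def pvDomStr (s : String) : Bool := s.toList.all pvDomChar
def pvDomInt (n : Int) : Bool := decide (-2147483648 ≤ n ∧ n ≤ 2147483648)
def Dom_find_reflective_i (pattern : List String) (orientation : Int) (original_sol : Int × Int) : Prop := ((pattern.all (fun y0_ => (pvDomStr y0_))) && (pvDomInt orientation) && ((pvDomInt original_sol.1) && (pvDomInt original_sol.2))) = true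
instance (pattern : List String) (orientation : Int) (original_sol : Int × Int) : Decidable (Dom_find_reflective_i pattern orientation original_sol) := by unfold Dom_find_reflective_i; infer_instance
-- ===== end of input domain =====

-- B replaces A's first-occurrence fingerprint list, potential_reflections pre-filter and
-- reversed-slice comparisons by one loop over candidate splits with a direct two-pointer
-- outward comparison of the rows (objective: faster).


-- ===== PORT A =====
-- pattern.index(x); in A, x is always drawn from pattern, so index? is always some
-- and the .getD 0 default is never the value returned (exact on every input).
def pvIdxA (pattern : List String) (x : String) : Nat :=
  (PySem.List.index? pattern x).getD 0

-- the loop 'for i in potential_reflections: …'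
def pvLoopA (c_counts : List Nat) (orientation : Int) (original_sol : Int × Int) :
    List Int → Int
  | [] => 0   -- 'return False'
  | i :: rest =>
    let after := PySem.List.slice c_counts (some (i + 1)) none
    let before := PySem.List.slice c_counts none (some (i + 1))
    if before.length < after.length then
      if before.reverse == PySem.List.slice after none (some ((before.length : Int))) then
        if (i + 1) ≠ original_sol.1 ∨ orientation ≠ original_sol.2 then i + 1
        else pvLoopA c_counts orientation original_sol rest
      else pvLoopA c_counts orientation original_sol rest
    else
      -- 'before = before[::-1]' then 'after == before[:len(after)]', with before[::-1] inlined
      if after == PySem.List.slice before.reverse none (some ((after.length : Int))) then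
        if (i + 1) ≠ original_sol.1 ∨ orientation ≠ original_sol.2 then i + 1
        else pvLoopA c_counts orientation original_sol rest
      else pvLoopA c_counts orientation original_sol rest

def find_reflective_i (pattern : List String) (orientation : Int) (original_sol : Int × Int) : Int :=
  let c_counts := pattern.map (pvIdxA pattern)
  let potential_reflections :=
    (PySem.List.pyRange 0 ((pattern.length : Int) - 1) 1).filter
      (fun i =>
        PySem.List.pyGetD (pattern.map (pvIdxA pattern)) i 0
          == PySem.List.pyGetD (pattern.map (pvIdxA pattern)) (i + 1) 0)
  pvLoopA c_counts orientation original_sol potential_reflections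

-- ===== PORT B =====
-- the 'while lo >= 0 and hi < n' two-pointer loop; lo is carried as lo1 = lo + 1
def pvMirrorB (pattern : List String) (n : Nat) : Nat → Nat → Bool
  | 0, _ => true
  | lo + 1, hi =>
    if hi < n then
      if pattern.getD lo "" == pattern.getD hi "" then pvMirrorB pattern n lo (hi + 1)
      else false
    else true

-- the 'for i in range(1, n)' loop
def pvScanB (pattern : List String) (orientation : Int) (original_sol : Int × Int)
    (n : Nat) : List Nat → Int
  | [] => 0   -- 'return False'
  | i :: rest =>
    if pvMirrorB pattern n i i
        && (decide ((i : Int) ≠ original_sol.1) || decide (orientation ≠ original_sol.2)) then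
      (i : Int)
    else pvScanB pattern orientation original_sol n rest

def find_reflective_i_alt (pattern : List String) (orientation : Int) (original_sol : Int × Int) : Int :=
  pvScanB pattern orientation original_sol pattern.length
    (List.range' 1 (pattern.length - 1))



-- ===== PRECONDITION & SPEC =====
-- Pre_ excludes exactly the inputs on which A finds no admissible mirror line and returns
-- the bool literal False, which is not a value of the declared return type Int.
def Pre_find_reflective_i (pattern : List String) (orientation : Int) (original_sol : Int × Int) : Prop :=
  ∃ j < pattern.length, 1 ≤ j ∧
    (∀ k, k < j → j + k < pattern.length → pattern.getD (j - 1 - k) "" = pattern.getD (j + k) "") ∧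
    ((j : Int) ≠ original_sol.1 ∨ orientation ≠ original_sol.2)
instance (pattern : List String) (orientation : Int) (original_sol : Int × Int) : Decidable (Pre_find_reflective_i pattern orientation original_sol) := by unfold Pre_find_reflective_i; infer_instance
def pvWitness_find_reflective_i : List String × Int × (Int × Int) := (["a", "b", "b", "a"], 0, (0, 0))

def Spec_find_reflective_i (pattern : List String) (orientation : Int) (original_sol : Int × Int) (out : Int) : Prop := out = find_reflective_i_alt pattern orientation original_sol
instance (pattern : List String) (orientation : Int) (original_sol : Int × Int) (out : Int) : Decidable (Spec_find_reflective_i pattern orientation original_sol out) := by unfold Spec_find_reflective_i; infer_instance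

-- ===== CLAIM (what is proved, stated in full; the proofs are below) =====
def Claim_equal_find_reflective_i : Prop := ∀ (pattern : List String) (orientation : Int) (original_sol : Int × Int), Dom_find_reflective_i pattern orientation original_sol → Pre_find_reflective_i pattern orientation original_sol → Spec_find_reflective_i pattern orientation original_sol (find_reflective_i pattern orientation original_sol)

-- ===== LEMMAS AND PROOFS =====

-- Lemma 1: fingerprint values agree iff rows agree
theorem pvIdxA_eq (p : List String) (a : Nat) (ha : a < p.length) :
    ∃ j, ∃ hj : j < p.length, PySem.List.index? p p[a] = some j ∧ p[j] = p[a] := by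
  have hm : p[a] ∈ p := List.getElem_mem ha
  have hs : (PySem.List.index? p p[a]).isSome := (PySem.List.index?_isSome_iff p p[a]).mpr hm
  obtain ⟨j, hj⟩ := Option.isSome_iff_exists.mp hs
  obtain ⟨hk, hv, _⟩ := PySem.List.getElem_of_index?_eq_some hj
  exact ⟨j, hk, hj, hv⟩

theorem c_eq_iff (p : List String) (a b : Nat) (ha : a < p.length) (hb : b < p.length) :
    ((p.map (pvIdxA p)).getD a 0 = (p.map (pvIdxA p)).getD b 0 ↔
      p.getD a "" = p.getD b "") := by
  have hca : (p.map (pvIdxA p)).getD a 0 = pvIdxA p p[a] := by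
    rw [List.getD_eq_getElem _ _ (by simpa using ha)]; simp
  have hcb : (p.map (pvIdxA p)).getD b 0 = pvIdxA p p[b] := by
    rw [List.getD_eq_getElem _ _ (by simpa using hb)]; simp
  rw [hca, hcb, List.getD_eq_getElem _ _ ha, List.getD_eq_getElem _ _ hb]
  obtain ⟨ja, hja, hia, hva⟩ := pvIdxA_eq p a ha
  obtain ⟨jb, hjb, hib, hvb⟩ := pvIdxA_eq p b hb
  constructor
  · intro h
    have hj : ja = jb := by
      have := h
      unfold pvIdxA at this
      rw [hia, hib] at this
      simpa using this
    rw [← hva, ← hvb]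
    subst hj
    rfl
  · intro h
    simp [pvIdxA, h]

-- Lemma 2: characterization of the two-pointer loop
theorem pvMirrorB_iff (p : List String) (n : Nat) (lo1 hi : Nat) :
    (pvMirrorB p n lo1 hi = true ↔
      ∀ j, j < lo1 → hi + j < n → p.getD (lo1 - 1 - j) "" = p.getD (hi + j) "") := by
  induction lo1 generalizing hi with
  | zero => simp [pvMirrorB]
  | succ lo ih =>
    rw [pvMirrorB]
    by_cases hn : hi < n
    · simp only [if_pos hn]
      by_cases he : p.getD lo "" = p.getD hi ""
      · simp only [he, beq_self_eq_true, if_pos]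
        rw [ih]
        constructor
        · intro h j hj hjn
          match j with
          | 0 => simpa using he
          | j+1 =>
            have := h j (by omega) (by omega)
            have e1 : lo + 1 - 1 - (j+1) = lo - 1 - j := by omega
            have e2 : hi + (j+1) = hi + 1 + j := by omega
            rw [e1, e2]; exact this
        · intro h j hj hjn
          have := h (j+1) (by omega) (by omega)
          have e1 : lo + 1 - 1 - (j+1) = lo - 1 - j := by omega
          have e2 : hi + (j+1) = hi + 1 + j := by omega
          rw [e1, e2] at this; exact this
      · have : (p.getD lo "" == p.getD hi "") = false := by simpa using he
        simp only [this, Bool.false_eq_true, if_false]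
        constructor
        · intro h; exact absurd h (by simp)
        · intro h
          exact absurd (h 0 (by omega) (by omega)) (by simpa using he)
    · simp only [if_neg hn]
      constructor
      · intro _ j hj hjn; omega
      · intro _; trivial


-- Lemma 3: A's reversed-slice comparison, in take/drop form, as a pointwise condition
theorem sliceCond_iff (c : List Nat) (k : Nat) (hk : k + 1 < c.length) :
    ((if (c.take (k+1)).length < (c.drop (k+1)).length
      then (c.take (k+1)).reverse == (c.drop (k+1)).take (c.take (k+1)).length
      else c.drop (k+1) == ((c.take (k+1)).reverse.take (c.drop (k+1)).length)) = true
     ↔ ∀ j, j < min (k+1) (c.length - (k+1)) → c.getD (k - j) 0 = c.getD (k+1+j) 0) := by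
  have hlb : (c.take (k+1)).length = k + 1 := by simp; omega
  have hla : (c.drop (k+1)).length = c.length - (k+1) := by simp
  have key : ∀ m : Nat, m ≤ k + 1 → m ≤ c.length - (k+1) →
      (((c.take (k+1)).reverse.take m = (c.drop (k+1)).take m) ↔
        ∀ j, j < m → c.getD (k - j) 0 = c.getD (k+1+j) 0) := by
    intro m hm1 hm2
    constructor
    · intro h j hj
      have h1 := List.getElem_of_eq h (i := j) (by simp; omega)
      have e1 : ((c.take (k+1)).reverse.take m)[j]'(by simp; omega) = c.getD (k - j) 0 := by
        rw [List.getElem_take, List.getElem_reverse, List.getElem_take]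
        rw [List.getD_eq_getElem _ _ (by omega)]
        try first | rfl | (congr 1; omega)
      have e2 : ((c.drop (k+1)).take m)[j]'(by simp; omega) = c.getD (k+1+j) 0 := by
        rw [List.getElem_take, List.getElem_drop]
        rw [List.getD_eq_getElem _ _ (by omega)]
      rw [← e1, ← e2]
      exact h1
    · intro h
      apply List.ext_getElem (by simp; omega)
      intro j hj1 hj2
      have hjm : j < m := by simp at hj1; omega
      have := h j hjm
      rw [List.getD_eq_getElem _ _ (by omega), List.getD_eq_getElem _ _ (by omega)] at this
      rw [List.getElem_take, List.getElem_reverse, List.getElem_take,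
          List.getElem_take, List.getElem_drop]
      convert this using 2
      omega
  by_cases hcmp : (c.take (k+1)).length < (c.drop (k+1)).length
  · rw [if_pos hcmp]
    have hm : min (k+1) (c.length - (k+1)) = k + 1 := by omega
    rw [beq_iff_eq, hm, hlb, ← key (k+1) (le_refl _) (by omega)]
    rw [List.take_of_length_le (l := (c.take (k+1)).reverse) (i := k+1) (by simp)]
  · rw [if_neg hcmp]
    have hm : min (k+1) (c.length - (k+1)) = c.length - (k+1) := by omega
    rw [beq_iff_eq, hm, hla, ← key (c.length - (k+1)) (by omega) (le_refl _)]
    rw [List.take_of_length_le (l := c.drop (k+1)) (i := c.length - (k+1)) (by simp)]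
    exact eq_comm

-- bridge: A's slice condition at split k+1 equals B's two-pointer check
theorem condA_eq_mirror (p : List String) (k : Nat) (hk : k + 1 < p.length) :
    ((if ((p.map (pvIdxA p)).take (k+1)).length < ((p.map (pvIdxA p)).drop (k+1)).length
      then ((p.map (pvIdxA p)).take (k+1)).reverse ==
             ((p.map (pvIdxA p)).drop (k+1)).take ((p.map (pvIdxA p)).take (k+1)).length
      else (p.map (pvIdxA p)).drop (k+1) ==
             (((p.map (pvIdxA p)).take (k+1)).reverse.take ((p.map (pvIdxA p)).drop (k+1)).length))
     = pvMirrorB p p.length (k+1) (k+1)) := by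
  have hc : (p.map (pvIdxA p)).length = p.length := by simp
  rw [Bool.eq_iff_iff]
  rw [sliceCond_iff _ k (by omega), pvMirrorB_iff]
  constructor
  · intro h j hj hjn
    have := h j (by omega)
    rw [c_eq_iff p _ _ (by omega) (by omega)] at this
    have e : k + 1 - 1 - j = k - j := by omega
    rw [e]
    convert this using 2
  · intro h j hj
    have hj1 : j < k + 1 := by omega
    have hj2 : k + 1 + j < p.length := by omega
    have := h j hj1 hj2
    rw [c_eq_iff p _ _ (by omega) (by omega)]
    have e : k + 1 - 1 - j = k - j := by omega
    rw [e] at this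
    exact this

-- one unfolding step of pvLoopA, with the two return-branches factored
theorem pvLoopA_cons (c : List Nat) (o : Int) (os : Int × Int) (i : Int) (rest : List Int) :
    pvLoopA c o os (i :: rest) =
      (if (if (PySem.List.slice c none (some (i+1))).length < (PySem.List.slice c (some (i+1)) none).length
           then (PySem.List.slice c none (some (i+1))).reverse ==
                  PySem.List.slice (PySem.List.slice c (some (i+1)) none) none
                    (some (((PySem.List.slice c none (some (i+1))).length : Int)))
           else PySem.List.slice c (some (i+1)) none ==
                  PySem.List.slice ((PySem.List.slice c none (some (i+1))).reverse) none
                    (some (((PySem.List.slice c (some (i+1)) none).length : Int))))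
       then (if (i + 1) ≠ os.1 ∨ o ≠ os.2 then i + 1 else pvLoopA c o os rest)
       else pvLoopA c o os rest) := by
  rw [pvLoopA]
  split_ifs <;> rfl

-- main loop correspondence
theorem loop_eq (p : List String) (o : Int) (os : Int × Int) (ks : List Nat)
    (hks : ∀ k ∈ ks, k + 1 < p.length) :
    pvLoopA (p.map (pvIdxA p)) o os
      ((ks.filter (fun k => (p.map (pvIdxA p)).getD k 0 == (p.map (pvIdxA p)).getD (k+1) 0)).map
        (fun k : Nat => (k : Int)))
    = pvScanB p o os p.length (ks.map (fun k => k + 1)) := by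
  induction ks with
  | nil => rfl
  | cons k rest ih =>
    have hk : k + 1 < p.length := hks k (List.mem_cons_self)
    have hrest := fun x hx => hks x (List.mem_cons_of_mem _ hx)
    set c := p.map (pvIdxA p) with hc
    have hcl : c.length = p.length := by simp [hc]
    -- the slices appearing in pvLoopA at i = (k : Int)
    have hs1 : PySem.List.slice c (some ((k : Int) + 1)) none = c.drop (k+1) := by
      have : (k : Int) + 1 = ((k + 1 : Nat) : Int) := by push_cast; ring
      rw [this, PySem.List.slice_from_natCast]
    have hs2 : PySem.List.slice c none (some ((k : Int) + 1)) = c.take (k+1) := by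
      have : (k : Int) + 1 = ((k + 1 : Nat) : Int) := by push_cast; ring
      rw [this, PySem.List.slice_to_natCast]
    by_cases hpre : (c.getD k 0 == c.getD (k+1) 0) = true
    · rw [show (k :: rest).filter (fun k => c.getD k 0 == c.getD (k+1) 0)
            = k :: rest.filter (fun k => c.getD k 0 == c.getD (k+1) 0) from by
          simp only [List.filter_cons, hpre, if_true], List.map_cons, List.map_cons]
      rw [pvLoopA_cons, pvScanB]
      rw [hs1, hs2]
      have hsl3 : PySem.List.slice (c.drop (k+1)) none (some (((c.take (k+1)).length : Nat) : Int))
          = (c.drop (k+1)).take (c.take (k+1)).length := PySem.List.slice_to_natCast _ _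
      have hsl4 : PySem.List.slice ((c.take (k+1)).reverse) none (some (((c.drop (k+1)).length : Nat) : Int))
          = ((c.take (k+1)).reverse).take (c.drop (k+1)).length := PySem.List.slice_to_natCast _ _
      rw [hsl3, hsl4]
      have hmir := condA_eq_mirror p k hk
      rw [← hc] at hmir
      rw [hmir]
      by_cases hm : pvMirrorB p p.length (k+1) (k+1) = true
      · rw [hm]
        by_cases hg : ((k : Int) + 1 ≠ os.1 ∨ o ≠ os.2)
        · have hgb : (decide (((k+1 : Nat) : Int) ≠ os.1) || decide (o ≠ os.2)) = true := by
            push_cast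
            rcases hg with h | h <;> simp [h]
          simp only [if_pos hg, Bool.true_and, hgb]
          push_cast
          ring
        · have hgb : (decide (((k+1 : Nat) : Int) ≠ os.1) || decide (o ≠ os.2)) = false := by
            push_cast at hg ⊢
            push Not at hg
            simp [hg.1, hg.2]
          simp only [if_neg hg, Bool.true_and, hgb]
          simpa using ih hrest
      · have hm' : pvMirrorB p p.length (k+1) (k+1) = false := by
          simpa using hm
        simp only [hm', Bool.false_and, Bool.false_eq_true, if_false]
        simpa using ih hrest
    · have hpre' : (c.getD k 0 == c.getD (k+1) 0) = false := by
        rwa [Bool.not_eq_true] at hpre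
      rw [show (k :: rest).filter (fun k => c.getD k 0 == c.getD (k+1) 0)
            = rest.filter (fun k => c.getD k 0 == c.getD (k+1) 0) from by
          simp only [List.filter_cons, hpre', Bool.false_eq_true, if_false], List.map_cons]
      rw [pvScanB]
      have hmf : pvMirrorB p p.length (k+1) (k+1) = false := by
        rw [pvMirrorB, if_pos hk]
        have hne : ¬ (p.getD k "" = p.getD (k+1) "") := by
          rw [← c_eq_iff p _ _ (by omega) (by omega)]
          intro h
          exact hpre (beq_iff_eq.mpr h)
        rw [beq_eq_false_iff_ne.mpr hne]
        simp only [Bool.false_eq_true, if_false]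
      rw [hmf]
      simpa using ih hrest

theorem ports_agree (p : List String) (o : Int) (os : Int × Int) :
    find_reflective_i p o os = find_reflective_i_alt p o os := by
  match hp : p with
  | [] => rfl
  | q :: t =>
    rw [find_reflective_i, find_reflective_i_alt]
    have hn : 1 ≤ p.length := by rw [hp]; simp
    rw [← hp]
    have h1 : ((p.length : Int) - 1) = ((p.length - 1 : Nat) : Int) := by
      push_cast [hn]; ring
    have h2 : PySem.List.pyRange 0 ((p.length : Int) - 1) 1
        = (List.range (p.length - 1)).map (fun k : Nat => (k : Int)) := by
      rw [h1, PySem.List.pyRange_zero_natCast]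
    rw [h2]
    have h3 : ((List.range (p.length - 1)).map (fun k : Nat => (k : Int))).filter
          (fun i => PySem.List.pyGetD (p.map (pvIdxA p)) i 0
            == PySem.List.pyGetD (p.map (pvIdxA p)) (i + 1) 0)
        = ((List.range (p.length - 1)).filter
            (fun k => (p.map (pvIdxA p)).getD k 0 == (p.map (pvIdxA p)).getD (k+1) 0)).map
          (fun k : Nat => (k : Int)) := by
      rw [List.filter_map]
      congr 1
      apply List.filter_congr
      intro k _
      have e : (k : Int) + 1 = ((k + 1 : Nat) : Int) := by push_cast; ring
      simp only [Function.comp, e, PySem.List.pyGetD_natCast]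
    rw [h3]
    have h4 : List.range' 1 (p.length - 1) = (List.range (p.length - 1)).map (fun k => k + 1) := by
      rw [List.range'_eq_map_range]
      apply List.map_congr_left
      intro k _
      omega
    rw [h4]
    exact loop_eq p o os (List.range (p.length - 1)) (fun k hk => by
      have := List.mem_range.mp hk; omega)

-- ===== VERDICT (by name: the statement is the Claim_ definition above) =====
theorem find_reflective_i_spec : Claim_equal_find_reflective_i := by
  intro p o os _ _
  exact ports_agree p o os
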